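-- pv_equiv track=rewrite | github.com/MlkMahmud/advent-of-code-2019 | 04/solution.py | new_possible_password_combinations
-- ===== SOURCE A (Python) =====
-- def new_possible_password_combinations(passwords):
--   possible_combinations = 0
--   for password in passwords:
--     for digit in set(password):
--       if password.count(digit) == 2:
--         possible_combinations += 1
--         break
--
--   return possible_combinations
-- ===== SOURCE B (Python) =====
-- def _has_run_of_two(chars):
--     # chars is sorted, so equal characters are contiguous: a character occurs
--     # exactly twice iff some maximal run has length exactly 2.
--     if not chars:
--         return False
--     cur, run = chars[0], 1
--     for x in chars[1:]:
--         if x == cur: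
--             run += 1
--         else:
--             if run == 2:
--                 return True
--             cur, run = x, 1
--     return run == 2
--
--
-- def new_possible_password_combinations(passwords):
--     return sum(1 for password in passwords if _has_run_of_two(sorted(password)))
-- ===== Notes on version B (the rewrite author's own statement) =====
-- stated objective: alternative
-- what changed: B sorts each password's characters and scans the sorted list once for a maximal run of length exactly 2, replacing A's per-distinct-digit rescanning (set + password.count + break) with a sort-then-run-length scan.
import Mathlib
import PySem

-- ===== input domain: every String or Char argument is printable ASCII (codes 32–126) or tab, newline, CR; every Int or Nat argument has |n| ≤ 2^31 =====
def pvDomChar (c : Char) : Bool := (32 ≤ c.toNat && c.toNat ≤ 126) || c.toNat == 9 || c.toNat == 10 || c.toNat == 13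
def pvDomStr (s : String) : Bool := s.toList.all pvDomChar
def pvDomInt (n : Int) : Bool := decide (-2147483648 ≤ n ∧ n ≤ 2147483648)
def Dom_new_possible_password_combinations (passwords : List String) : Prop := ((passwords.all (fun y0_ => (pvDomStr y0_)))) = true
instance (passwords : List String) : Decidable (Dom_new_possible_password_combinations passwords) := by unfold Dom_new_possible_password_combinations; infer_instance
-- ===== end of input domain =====

-- B sorts each password's characters and scans the sorted list once for a maximal run
-- of length exactly 2, instead of A's rescanning of the password per distinct digit (alternative).

-- ===== PORT A =====
-- inner 'for digit in set(password): if password.count(digit) == 2: +1; break'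
-- (password.count(d) for a 1-character d is exactly the count of that character)
def pvInnerA (password : List Char) : List Char → Int
  | [] => 0
  | d :: rest => if (password.count d : Int) = 2 then 1 else pvInnerA password rest

def new_possible_password_combinations (passwords : List String) : Int :=
  passwords.foldl (fun acc pw => acc + pvInnerA pw.toList (PySem.Set.ofList pw.toList)) 0

-- ===== PORT B =====
-- the inner loop of _has_run_of_two over the tail, state = (cur, run)
def pvGo (c : Char) (n : Nat) : List Char → Bool
  | [] => n == 2
  | x :: xs => if x == c then pvGo c (n + 1) xs else (n == 2) || pvGo x 1 xs

def pvHasRun2 : List Char → Bool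
  | [] => false
  | c :: rest => pvGo c 1 rest

def new_possible_password_combinations_alt (passwords : List String) : Int :=
  passwords.foldl (fun acc pw =>
    if pvHasRun2 (PySem.List.sorted pw.toList (fun c => c) false) then acc + 1 else acc) 0

-- ===== PRECONDITION & SPEC =====
def Spec_new_possible_password_combinations (passwords : List String) (out : Int) : Prop := out = new_possible_password_combinations_alt passwords
instance (passwords : List String) (out : Int) : Decidable (Spec_new_possible_password_combinations passwords out) := by unfold Spec_new_possible_password_combinations; infer_instance

-- ===== CLAIM (what is proved, stated in full; the proofs are below) =====
def Claim_equal_new_possible_password_combinations : Prop := ∀ (passwords : List String), Dom_new_possible_password_combinations passwords → Spec_new_possible_password_combinations passwords (new_possible_password_combinations passwords)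

-- ===== LEMMAS AND PROOFS =====

-- A's inner loop result is 0 or 1
theorem pvInnerA_cases (password l : List Char) :
    pvInnerA password l = 0 ∨ pvInnerA password l = 1 := by
  induction l with
  | nil => left; rfl
  | cons d rest ih =>
      by_cases h : (password.count d : Int) = 2
      · right; simp [pvInnerA, h]
      · simpa [pvInnerA, h] using ih

-- A's inner loop returns 1 iff some character occurs exactly twice
theorem pvInnerA_eq_one_iff (password : List Char) :
    pvInnerA password (PySem.Set.ofList password) = 1 ↔ ∃ d, password.count d = 2 := by
  have key : ∀ l : List Char, pvInnerA password l = 1 ↔ ∃ d ∈ l, password.count d = 2 := by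
    intro l
    induction l with
    | nil => simp [pvInnerA]
    | cons d rest ih =>
        by_cases h : (password.count d : Int) = 2
        · have hd2 : password.count d = 2 := by exact_mod_cast h
          simp only [pvInnerA, if_pos h]
          exact iff_of_true trivial ⟨d, by simp, hd2⟩
        · have h' : password.count d ≠ 2 := by
            intro hc; exact h (by exact_mod_cast hc)
          simp [pvInnerA, h, ih, h']
  rw [key]
  constructor
  · rintro ⟨d, _, hd⟩; exact ⟨d, hd⟩
  · rintro ⟨d, hd⟩
    have hm : d ∈ password := by
      have : 0 < password.count d := by omega
      exact List.count_pos_iff.mp this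
    exact ⟨d, (PySem.Set.mem_ofList _ _).mpr hm, hd⟩

-- the scan loop on a ≤-sorted tail: finds a run of length exactly 2
theorem pvGo_spec (xs : List Char) (c : Char) (n : Nat)
    (h : (c :: xs).Pairwise (· ≤ ·)) :
    (pvGo c n xs = true ↔ n + xs.count c = 2 ∨ ∃ d, d ≠ c ∧ xs.count d = 2) := by
  induction xs generalizing c n with
  | nil => simp [pvGo]
  | cons x xs' ih =>
      rcases List.pairwise_cons.mp h with ⟨hcle, htail⟩
      by_cases hx : x = c
      · subst hx
        have hsort : (x :: xs').Pairwise (· ≤ ·) := htail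
        have := ih x (n + 1) hsort
        simp only [pvGo, if_pos (by simp : (x == x) = true)]
        rw [this]
        constructor
        · rintro (h1 | ⟨d, hd, hc2⟩)
          · left; simp only [List.count_cons]; simp; omega
          · right; exact ⟨d, hd, by simp only [List.count_cons]; simp [Ne.symm hd]; omega⟩
        · rintro (h1 | ⟨d, hd, hc2⟩)
          · left; simp only [List.count_cons] at h1 ⊢; simp at h1 ⊢; omega
          · right; refine ⟨d, hd, ?_⟩
            simp only [List.count_cons] at hc2; simp [Ne.symm hd] at hc2; omega
      · have hcx : c < x := lt_of_le_of_ne (hcle x (by simp)) (fun he => hx he.symm)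
        have hnoc : xs'.count c = 0 := by
          rw [List.count_eq_zero]
          intro hmem
          have hxd := (List.pairwise_cons.mp htail).1 c hmem
          exact absurd hxd (not_le.mpr hcx)
        have := ih x 1 htail
        simp only [pvGo, hx, if_false, Bool.or_eq_true, beq_iff_eq]
        rw [this]
        constructor
        · rintro (h1 | h2 | ⟨d, hd, hc2⟩)
          · left; simp only [List.count_cons]; simp [hx, hnoc]; omega
          · right; exact ⟨x, hx, by simp only [List.count_cons]; simp; omega⟩
          · right
            have hdm : d ∈ xs' := List.count_pos_iff.mp (by omega)
            have hdc : c < d := lt_of_lt_of_le hcx ((List.pairwise_cons.mp htail).1 d hdm)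
            exact ⟨d, ne_of_gt hdc, by simp only [List.count_cons]; simp [Ne.symm hd]; omega⟩
        · rintro (h1 | ⟨d, hd, hc2⟩)
          · left; simp only [List.count_cons] at h1; simp [hx, hnoc] at h1; omega
          · by_cases hdx : d = x
            · subst hdx
              right; left; simp only [List.count_cons] at hc2; simp at hc2; omega
            · right; right
              refine ⟨d, hdx, ?_⟩
              simp only [List.count_cons] at hc2; simp [Ne.symm hdx] at hc2; omega

theorem pvHasRun2_iff (l : List Char) (h : l.Pairwise (· ≤ ·)) :
    (pvHasRun2 l = true ↔ ∃ d, l.count d = 2) := by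
  cases l with
  | nil => simp [pvHasRun2]
  | cons c rest =>
      simp only [pvHasRun2]
      rw [pvGo_spec rest c 1 h]
      constructor
      · rintro (h1 | ⟨d, hd, hc2⟩)
        · exact ⟨c, by simp only [List.count_cons]; simp; omega⟩
        · exact ⟨d, by simp only [List.count_cons]; simp [Ne.symm hd]; omega⟩
      · rintro ⟨d, hd⟩
        by_cases hdc : d = c
        · subst hdc; left; simp only [List.count_cons] at hd; simp at hd; omega
        · right; refine ⟨d, hdc, ?_⟩
          simp only [List.count_cons] at hd; simp [Ne.symm hdc] at hd; omega

-- per-password agreement of the two bodies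
theorem pv_body_eq (pw : List Char) :
    pvInnerA pw (PySem.Set.ofList pw) =
      if pvHasRun2 (PySem.List.sorted pw (fun c => c) false) then 1 else 0 := by
  have hperm : (PySem.List.sorted pw (fun c : Char => c) false).Perm pw :=
    PySem.List.sorted_perm pw (fun c => c) false
  have hpair : (PySem.List.sorted pw (fun c : Char => c) false).Pairwise (· ≤ ·) :=
    PySem.List.sorted_pairwise pw (fun c => c)
  have hiff : pvHasRun2 (PySem.List.sorted pw (fun c : Char => c) false) = true ↔
      ∃ d, pw.count d = 2 := by
    rw [pvHasRun2_iff _ hpair]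
    constructor <;> rintro ⟨d, hd⟩ <;> exact ⟨d, by rw [← hd]; exact (hperm.count_eq d).symm ▸ rfl⟩
  by_cases hb : pvHasRun2 (PySem.List.sorted pw (fun c : Char => c) false) = true
  · rw [if_pos hb]
    exact (pvInnerA_eq_one_iff pw).mpr (hiff.mp hb)
  · rw [if_neg hb]
    rcases pvInnerA_cases pw (PySem.Set.ofList pw) with h0 | h1
    · exact h0
    · exact absurd (hiff.mpr ((pvInnerA_eq_one_iff pw).mp h1)) hb

theorem pv_foldl_eq (passwords : List String) (a : Int) :
    passwords.foldl (fun acc pw => acc + pvInnerA pw.toList (PySem.Set.ofList pw.toList)) a =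
    passwords.foldl (fun acc pw =>
      if pvHasRun2 (PySem.List.sorted pw.toList (fun c => c) false) then acc + 1 else acc) a := by
  induction passwords generalizing a with
  | nil => rfl
  | cons pw rest ih =>
      simp only [List.foldl_cons, pv_body_eq pw.toList]
      rw [ih]
      congr 1
      split <;> omega

-- ===== VERDICT (by name: the statement is the Claim_ definition above) =====
theorem new_possible_password_combinations_spec : Claim_equal_new_possible_password_combinations := by
  intro passwords _
  unfold Spec_new_possible_password_combinations new_possible_password_combinations
    new_possible_password_combinations_alt
  exact pv_foldl_eq passwords 0
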